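-- pv_equiv track=rewrite | github.com/daniel-reich/ubiquitous-fiesta | WxkFoXTLYiAq57uDq_6.py | find_and_remove
-- ===== SOURCE A (Python) =====
-- def find_and_remove(dct):
--   for room,items in dct.items():
--     for item,price in items.items():
--       try:
--         dct[room][item] = int(price)
--       except:
--         dct[room][item] = -1
--     dct[room] = {k:v for k,v in items.items() if v > 0}
--   return dct
-- ===== SOURCE B (Python) =====
-- def _prune(pairs):
--   # Build the cleaned room dict recursively, back-to-front: clean the tail
--   # first, then prepend the head item (converted) only if it is positive.
--   if not pairs:
--     return {}
--   (item, price) = pairs[0]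
--   try:
--     p = int(price)
--   except:
--     p = -1
--   tail = _prune(pairs[1:])
--   if p > 0:
--     head = {item: p}
--     head.update(tail)
--     return head
--   return tail
--
-- def find_and_remove(dct):
--   for room in dct:
--     dct[room] = _prune(list(dct[room].items()))
--   return dct
-- ===== Notes on version B (the rewrite author's own statement) =====
-- stated objective: alternative
-- what changed: B replaces A's two imperative passes per room (overwrite every price with int(price) in place, then rebuild by a filtering comprehension) with a recursive helper that builds each cleaned room dict back-to-front: it recurses on the tail of the item list first and then merges the converted head entry in front only when positive.
import Mathlib
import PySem

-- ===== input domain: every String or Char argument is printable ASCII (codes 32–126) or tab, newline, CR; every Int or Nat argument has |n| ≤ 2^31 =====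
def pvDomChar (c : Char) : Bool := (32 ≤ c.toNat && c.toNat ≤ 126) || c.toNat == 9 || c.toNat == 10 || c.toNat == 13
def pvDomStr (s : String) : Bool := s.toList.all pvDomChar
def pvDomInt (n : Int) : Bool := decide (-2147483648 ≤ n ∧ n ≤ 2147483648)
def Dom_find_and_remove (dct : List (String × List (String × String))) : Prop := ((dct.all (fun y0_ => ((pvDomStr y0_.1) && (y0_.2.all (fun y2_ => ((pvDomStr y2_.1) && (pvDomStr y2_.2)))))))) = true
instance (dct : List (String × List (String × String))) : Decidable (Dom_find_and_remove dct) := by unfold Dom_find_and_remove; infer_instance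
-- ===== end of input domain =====

-- B replaces A's two imperative passes per room (convert in place, then filter by
-- comprehension) with a recursive helper building each cleaned room dict back-to-front;
-- equivalence is about the RETURN value (both Pythons mutate and return the argument dict).

-- ===== PORT A =====
-- A: for each room, first overwrite every price with int(price) (or -1 on exception),
-- then rebuild the room's dict keeping only positive values.
def find_and_remove (dct : List (String × List (String × String))) : List (String × List (String × Int)) :=
  (PySem.Dict.ofList dct).items.map (fun ri =>
    let items := PySem.Dict.ofList ri.2
    -- for item,price in items.items(): dct[room][item] = int(price) / except: -1
    let conv := items.items.foldl
      (fun (acc : PySem.Dict String Int) kv =>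
        acc.insert kv.1 ((PySem.Int.ofStr? kv.2).getD (-1))) PySem.Dict.empty
    -- dct[room] = {k:v for k,v in items.items() if v > 0}
    (ri.1, (PySem.Dict.ofList (conv.items.filter (fun kv => kv.2 > 0))).items))

-- ===== PORT B =====
-- B's helper _prune: recurse on the tail first, then merge the converted head in front
-- only when it is positive ({item: p} followed by head.update(tail)).
def pruneRoom : List (String × String) → PySem.Dict String Int
  | [] => PySem.Dict.empty
  | (item, price) :: rest =>
    let p := (PySem.Int.ofStr? price).getD (-1)
    let tail := pruneRoom rest
    if p > 0 then (PySem.Dict.ofList [(item, p)]).update tail.items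
    else tail

-- B: for room in dct: dct[room] = _prune(list(dct[room].items()))
def find_and_remove_alt (dct : List (String × List (String × String))) : List (String × List (String × Int)) :=
  (PySem.Dict.ofList dct).items.map (fun ri =>
    (ri.1, (pruneRoom (PySem.Dict.ofList ri.2).items).items))

-- ===== PRECONDITION & SPEC =====
def Spec_find_and_remove (dct : List (String × List (String × String))) (out : List (String × List (String × Int))) : Prop := out = find_and_remove_alt dct
instance (dct : List (String × List (String × String))) (out : List (String × List (String × Int))) : Decidable (Spec_find_and_remove dct out) := by unfold Spec_find_and_remove; infer_instance

-- ===== CLAIM =====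
def Claim_equal_find_and_remove : Prop := ∀ (dct : List (String × List (String × String))), Dom_find_and_remove dct → Spec_find_and_remove dct (find_and_remove dct)

-- ===== LEMMAS AND PROOFS =====

-- a dict built from a list with distinct keys has exactly that list as its items
lemma ofList_items_of_nodup {ν : Type} (M : List (String × ν)) (h : (M.map (·.1)).Nodup) :
    (PySem.Dict.ofList M).items = M := by
  have := PySem.Dict.items_foldl_insert_fresh M (·.1) (·.2) PySem.Dict.empty
    (fun a _ => PySem.Dict.contains_empty a.1) h
  simpa [PySem.Dict.ofList] using this

-- B's recursive builder produces exactly the converted-and-filtered items, in order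
lemma prune_items :
    ∀ (L : List (String × String)), (L.map (·.1)).Nodup →
    (pruneRoom L).items
      = (L.map (fun kv => (kv.1, (PySem.Int.ofStr? kv.2).getD (-1)))).filter
          (fun kv => kv.2 > 0) := by
  intro L
  induction L with
  | nil => intro _; rfl
  | cons hd tl ih =>
    intro hnd
    simp only [List.map_cons, List.nodup_cons] at hnd
    have htl := ih hnd.2
    obtain ⟨item, price⟩ := hd
    simp only [pruneRoom]
    set p := (PySem.Int.ofStr? price).getD (-1) with hp
    by_cases hpos : p > 0
    · -- tail keys are distinct and all come from tl, hence differ from item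
      have hsub : ((pruneRoom tl).items.map (·.1)).Sublist (tl.map (·.1)) := by
        rw [htl]
        have h1 : (((tl.map (fun kv => (kv.1, (PySem.Int.ofStr? kv.2).getD (-1)))).filter
            (fun kv => kv.2 > 0)).map (·.1)).Sublist
            ((tl.map (fun kv => (kv.1, (PySem.Int.ofStr? kv.2).getD (-1)))).map (·.1)) :=
          List.Sublist.map _ List.filter_sublist
        simpa [List.map_map, Function.comp] using h1
      have hndtl : ((pruneRoom tl).items.map (·.1)).Nodup := hnd.2.sublist hsub
      have hbase : (PySem.Dict.ofList [(item, p)]).items = [(item, p)] := by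
        have h0 : (PySem.Dict.empty : PySem.Dict String Int).contains item = false :=
          PySem.Dict.contains_empty item
        show ((PySem.Dict.empty : PySem.Dict String Int).insert item p).items = [(item, p)]
        rw [PySem.Dict.items_insert_of_not_contains _ _ h0]
        rfl
      have hfresh : ∀ a ∈ (pruneRoom tl).items,
          (PySem.Dict.ofList [(item, p)]).contains a.1 = false := by
        intro a ha
        have hmem : a.1 ∈ tl.map (·.1) := hsub.mem (List.mem_map_of_mem ha)
        have hne : a.1 ≠ item := fun he => hnd.1 (he ▸ hmem)
        simp [PySem.Dict.ofList, PySem.Dict.update, PySem.Dict.contains_insert, hne]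
      have hupd := PySem.Dict.items_foldl_insert_fresh (pruneRoom tl).items
        (·.1) (·.2) (PySem.Dict.ofList [(item, p)]) hfresh hndtl
      simp only [if_pos hpos, PySem.Dict.update]
      rw [show (fun (acc : PySem.Dict String Int) (q : String × Int) =>
            acc.insert q.1 q.2) = (fun acc q => acc.insert ((·.1) q) ((·.2) q)) from rfl]
      rw [hupd, hbase, htl, List.map_cons, List.filter_cons]
      simp only [← hp]
      simp [hpos]
    · simp only [if_neg hpos]
      rw [htl, List.map_cons, List.filter_cons]
      simp only [← hp]
      simp [hpos]

-- the per-room values agree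
lemma room_eq (ri : String × List (String × String)) :
    (PySem.Dict.ofList
      (((PySem.Dict.ofList ri.2).items.foldl
          (fun (acc : PySem.Dict String Int) kv =>
            acc.insert kv.1 ((PySem.Int.ofStr? kv.2).getD (-1))) PySem.Dict.empty).items.filter
        (fun kv => kv.2 > 0))).items
    = (pruneRoom (PySem.Dict.ofList ri.2).items).items := by
  set f : String → Int := fun s => (PySem.Int.ofStr? s).getD (-1) with hf
  set L := (PySem.Dict.ofList ri.2).items with hL
  have hnd : (L.map (·.1)).Nodup := by
    have := PySem.Dict.nodup_keys_ofList ri.2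
    simpa [PySem.Dict.keys, hL] using this
  -- A's first pass: inserting all converted values into an empty dict is a map
  have hconv : (L.foldl (fun (acc : PySem.Dict String Int) kv =>
      acc.insert kv.1 (f kv.2)) PySem.Dict.empty).items
      = L.map (fun kv => (kv.1, f kv.2)) := by
    have := PySem.Dict.items_foldl_insert_fresh L (·.1) (fun kv => f kv.2) PySem.Dict.empty
      (fun a _ => PySem.Dict.contains_empty a.1) hnd
    simpa using this
  -- the filtered map still has distinct keys
  have hnd2 : (((L.map (fun kv => (kv.1, f kv.2))).filter (fun kv => kv.2 > 0)).map (·.1)).Nodup := by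
    have hsub : ((L.map (fun kv => (kv.1, f kv.2))).filter (fun kv => kv.2 > 0)).map (·.1)
        |>.Sublist ((L.map (fun kv => (kv.1, f kv.2))).map (·.1)) :=
      List.Sublist.map _ List.filter_sublist
    have : ((L.map (fun kv => (kv.1, f kv.2))).map (·.1)).Nodup := by
      simpa [List.map_map, Function.comp] using hnd
    exact this.sublist hsub
  rw [hconv, ofList_items_of_nodup _ hnd2, prune_items L hnd]

-- ===== VERDICT =====
theorem find_and_remove_spec : Claim_equal_find_and_remove := by
  intro dct _
  unfold Spec_find_and_remove find_and_remove find_and_remove_alt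
  apply List.map_congr_left
  intro ri _
  exact congrArg (Prod.mk ri.1) (room_eq ri)
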